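-- pv_equiv track=rewrite | github.com/HongsenHe/algo2018 | 1062_longest_repeating_substring.py | search
-- ===== SOURCE A (Python) =====
-- def search(size, s):
--     visited = set()
--     n = len(s)
--
--     for start in range(n - size + 1):
--         tmp = s[start: start + size]
--         if tmp in visited:
--             return start
--         visited.add(tmp)
--
--     return -1
-- ===== SOURCE B (Python) =====
-- def search(size, s):
--     # Rabin-Karp: rolling polynomial hash over a sliding window, buckets of
--     # candidate starts per hash value, exact substring comparison on hash hit.
--     n = len(s)
--     if size < 1 or size > n:
--         return -1
--     MOD = 2305843009213693951  # 2**61 - 1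
--     BASE = 256
--     h = 0
--     for i in range(size):
--         h = (h * BASE + ord(s[i])) % MOD
--     pw = pow(BASE, size - 1, MOD)
--     buckets = {h: [0]}
--     for start in range(1, n - size + 1):
--         h = ((h - ord(s[start - 1]) * pw) * BASE + ord(s[start + size - 1])) % MOD
--         cand = buckets.get(h)
--         if cand is not None:
--             cur = s[start:start + size]
--             for j in cand:
--                 if s[j:j + size] == cur:
--                     return start
--             cand.append(start)
--         else:
--             buckets[h] = [start]
--     return -1
-- ===== Notes on version B (the rewrite author's own statement) =====
-- stated objective: alternative
-- what changed: A stores every size-length window substring in a set and looks each new window up by value; B replaces this with a Rabin-Karp rolling polynomial hash updated per position, keeping buckets of start indices per hash value and confirming a repeat by one exact substring comparison.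
-- outside the precondition, e.g. on search(0, 'ab'): A returns 1, B returns -1; on search(-1, 'ab'): A returns 2, B returns -1
import Mathlib
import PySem

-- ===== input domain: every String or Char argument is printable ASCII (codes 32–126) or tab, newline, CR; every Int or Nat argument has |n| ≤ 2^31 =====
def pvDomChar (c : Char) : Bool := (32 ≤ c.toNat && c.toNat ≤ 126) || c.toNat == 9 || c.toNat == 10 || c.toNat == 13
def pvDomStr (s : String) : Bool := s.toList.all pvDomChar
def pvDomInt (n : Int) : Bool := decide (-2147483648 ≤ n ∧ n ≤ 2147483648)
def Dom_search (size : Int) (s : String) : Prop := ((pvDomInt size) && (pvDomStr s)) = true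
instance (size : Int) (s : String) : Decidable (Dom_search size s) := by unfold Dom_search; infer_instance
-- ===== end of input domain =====

-- B is an alternative exact algorithm: a Rabin–Karp rolling hash with buckets of starts
-- per hash value and exact substring comparison on a hash hit, instead of A's set of
-- window substrings. Return value only; neither version mutates its arguments.

-- ===== PORT A =====
-- 'for start in range(n - size + 1)' with an early return, ported as a counter loop
-- (Python's range is lazy, so the loop body runs start = 0, 1, … until a return)
def searchGoA (size : Int) (s : String) (visited : PySem.Set String) (start stop : Int) : Int :=
  if start < stop then
    let tmp := PySem.Str.slice s (some start) (some (start + size))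
    if PySem.Set.contains visited tmp then start
    else searchGoA size s (PySem.Set.add visited tmp) (start + 1) stop
  else -1
termination_by (stop - start).toNat
decreasing_by omega

def search (size : Int) (s : String) : Int :=
  searchGoA size s PySem.Set.empty 0 ((PySem.Str.len s) - size + 1)

-- ===== PORT B =====
def pvMOD : Int := 2305843009213693951
def pvBASE : Int := 256
-- ord(s[i]); callers only use it with 0 ≤ i < len s, where it is exact
def pvOrd (s : String) (i : Int) : Int := ((PySem.List.pyGetD s.toList i ' ').toNat : Int)

def searchGoB (size : Int) (s : String) (pw : Int) (h : Int)
    (buckets : PySem.Dict Int (List Int)) : List Int → Int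
  | [] => -1
  | start :: rest =>
    let h' := PySem.Int.mod ((h - pvOrd s (start - 1) * pw) * pvBASE + pvOrd s (start + size - 1)) pvMOD
    match buckets.get? h' with
    | some cand =>
        let cur := PySem.Str.slice s (some start) (some (start + size))
        if cand.any (fun j => PySem.Str.slice s (some j) (some (j + size)) == cur) then start
        else searchGoB size s pw h' (buckets.insert h' (cand ++ [start])) rest
    | none => searchGoB size s pw h' (buckets.insert h' [start]) rest

def search_alt (size : Int) (s : String) : Int :=
  let n : Int := PySem.Str.len s
  if size < 1 ∨ n < size then -1
  else
    let h0 := (PySem.List.pyRange 0 size 1).foldl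
      (fun h i => PySem.Int.mod (h * pvBASE + pvOrd s i) pvMOD) 0
    let pw := PySem.Int.powMod pvBASE (size - 1).toNat pvMOD
    searchGoB size s pw h0 (PySem.Dict.insert PySem.Dict.empty h0 [0]) (PySem.List.pyRange 1 (n - size + 1) 1)

-- ===== PRECONDITION & SPEC =====
-- Pre_ excludes nonpositive window sizes, an unspecified degenerate corner: there A's
-- slices s[start:start+size] are empty or truncated strings and A returns small positive
-- indices from their accidental collisions, while B (windows of positive length only)
-- returns -1; both answers are defensible and no caller of the task would pass size < 1.
def Pre_search (size : Int) (s : String) : Prop := 1 ≤ size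
instance (size : Int) (s : String) : Decidable (Pre_search size s) := by unfold Pre_search; infer_instance

def pvWitness_search : Int × String := (2, "abcab abx")

def Spec_search (size : Int) (s : String) (out : Int) : Prop := out = search_alt size s
instance (size : Int) (s : String) (out : Int) : Decidable (Spec_search size s out) := by unfold Spec_search; infer_instance

-- ===== CLAIM (what is proved, stated in full; the proofs are below) =====
def Claim_equal_search : Prop := ∀ (size : Int) (s : String), Dom_search size s → Pre_search size s → Spec_search size s (search size s)

-- ===== LEMMAS AND PROOFS =====

-- window of the string: the characters s[j : j+size]
def pvW (s : String) (size : Int) (j : Int) : List Char :=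
  PySem.List.slice s.toList (some j) (some (j + size))
-- the window as the string the two ports compare / store
def pvWS (s : String) (size : Int) (j : Int) : String :=
  PySem.Str.slice s (some j) (some (j + size))
-- un-reduced polynomial hash
def pvUH (l : List Char) (acc : Int) : Int := l.foldl (fun h c => h * pvBASE + (c.toNat : Int)) acc
-- reduced polynomial hash (exactly the fold both hash computations of B perform)
def pvPH (l : List Char) : Int := l.foldl (fun h c => PySem.Int.mod (h * pvBASE + (c.toNat : Int)) pvMOD) 0
-- hash of window j
def pvH (s : String) (size : Int) (j : Int) : Int := pvPH (pvW s size j)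
-- the bucket invariant: every hash value maps to exactly the starts < a having that hash
def pvInv (s : String) (size : Int) (d : PySem.Dict Int (List Int)) (a : Int) : Prop :=
  ∀ v : Int, d.get? v =
    (let l := (PySem.List.pyRange 0 a 1).filter (fun j => pvH s size j == v);
     if l.isEmpty then none else some l)

theorem pvWS_toList (s : String) (size j : Int) : (pvWS s size j).toList = pvW s size j := by
  simp [pvWS, pvW, PySem.Str.slice]

theorem pvWS_eq_iff (s : String) (size j k : Int) :
    pvWS s size j = pvWS s size k ↔ pvW s size j = pvW s size k := by
  constructor
  · intro h; rw [← pvWS_toList, ← pvWS_toList, h]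
  · intro h
    apply String.toList_inj.mp
    rw [pvWS_toList, pvWS_toList]; exact h

theorem pvMOD_pos : (0 : Int) < pvMOD := by norm_num [pvMOD]

theorem pvPH_foldl_emod (l : List Char) : ∀ acc : Int,
    l.foldl (fun h c => PySem.Int.mod (h * pvBASE + (c.toNat : Int)) pvMOD) (acc % pvMOD)
      = (pvUH l acc) % pvMOD := by
  induction l with
  | nil => intro acc; simp [pvUH]
  | cons c l ih =>
    intro acc
    have hm : PySem.Int.mod ((acc % pvMOD) * pvBASE + (c.toNat : Int)) pvMOD
        = (acc * pvBASE + (c.toNat : Int)) % pvMOD := by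
      rw [PySem.Int.mod_eq_emod_of_pos pvMOD_pos, Int.add_emod, Int.mul_emod,
        Int.emod_emod_of_dvd _ dvd_rfl, ← Int.mul_emod, ← Int.add_emod]
    simp only [List.foldl_cons, hm]
    have := ih (acc * pvBASE + (c.toNat : Int))
    simpa [pvUH] using this

theorem pvPH_eq_emod (l : List Char) : pvPH l = (pvUH l 0) % pvMOD := by
  have := pvPH_foldl_emod l 0
  simpa [pvPH] using this

theorem pvUH_append (l : List Char) (d : Char) (acc : Int) :
    pvUH (l ++ [d]) acc = pvUH l acc * pvBASE + (d.toNat : Int) := by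
  simp [pvUH]

theorem pvUH_shift (l : List Char) : ∀ acc : Int,
    pvUH l acc = acc * pvBASE ^ l.length + pvUH l 0 := by
  induction l with
  | nil => intro acc; simp [pvUH]
  | cons c l ih =>
    intro acc
    simp only [pvUH, List.foldl_cons] at *
    rw [ih (acc * pvBASE + (c.toNat : Int)), ih (0 * pvBASE + (c.toNat : Int))]
    simp [List.length_cons, pow_succ]
    ring

theorem pvUH_cons (c : Char) (l : List Char) :
    pvUH (c :: l) 0 = (c.toNat : Int) * pvBASE ^ l.length + pvUH l 0 := by
  have : pvUH (c :: l) 0 = pvUH l (0 * pvBASE + (c.toNat : Int)) := by simp [pvUH]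
  rw [this, pvUH_shift]
  ring

-- the rolling-hash update of B computes the hash of the next window
theorem pvRoll (s : String) (size t pw : Int)
    (hsz : 1 ≤ size) (ht : 1 ≤ t) (hb : t + size ≤ (s.toList.length : Int))
    (hpw : pw = PySem.Int.mod (pvBASE ^ (size - 1).toNat) pvMOD) :
    PySem.Int.mod ((pvH s size (t - 1) - pvOrd s (t - 1) * pw) * pvBASE + pvOrd s (t + size - 1)) pvMOD
      = pvH s size t := by
  set L := s.toList with hL
  set a := t.toNat with ha
  set sz := size.toNat with hsz'
  have hta : t = (a : Int) := by omega
  have hsa : size = (sz : Int) := by omega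
  have ha1 : 1 ≤ a := by omega
  have hs1 : 1 ≤ sz := by omega
  have hlen : a + sz ≤ L.length := by omega
  -- the previous window decomposes as head :: mid
  have hW1 : pvW s size (t - 1) = L.getD (a - 1) ' ' :: (L.drop a).take (sz - 1) := by
    rw [pvW, PySem.List.slice_toNat (xs := s.toList) (a := t - 1) (b := t - 1 + size) (by omega) (by omega)]
    have h1 : (t - 1).toNat = a - 1 := by omega
    rw [h1]
    have h2 : (t - 1 + size).toNat - (a - 1) = (sz - 1) + 1 := by omega
    rw [h2, List.drop_eq_getElem_cons (by omega : a - 1 < L.length)]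
    have h3 : a - 1 + 1 = a := by omega
    rw [h3, List.take_succ_cons, ← List.getD_eq_getElem L ' ' (by omega : a - 1 < L.length)]
  -- the next window decomposes as mid ++ [last]
  have hW2 : pvW s size t = (L.drop a).take (sz - 1) ++ [L.getD (a + (sz - 1)) ' '] := by
    rw [pvW, PySem.List.slice_toNat (xs := s.toList) (a := t) (b := t + size) (by omega) (by omega)]
    have h2 : (t + size).toNat - t.toNat = (sz - 1) + 1 := by omega
    rw [h2, List.take_succ]
    have hlt : sz - 1 < (L.drop t.toNat).length := by
      rw [List.length_drop]; omega
    rw [List.getElem?_eq_getElem hlt]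
    simp only [Option.toList_some, List.getElem_drop]
    rw [← List.getD_eq_getElem L ' ' (by omega : t.toNat + (sz - 1) < L.length)]
  have hmidlen : ((L.drop a).take (sz - 1)).length = sz - 1 := by
    simp [List.length_take, List.length_drop]; omega
  -- the two character reads
  have hc : pvOrd s (t - 1) = ((L.getD (a - 1) ' ').toNat : Int) := by
    rw [pvOrd, ← hL, PySem.List.pyGetD_of_nonneg L ' ' (by omega : (0:Int) ≤ t - 1)]
    have h1 : (t - 1).toNat = a - 1 := by omega
    rw [h1]
  have hd : pvOrd s (t + size - 1) = ((L.getD (a + (sz - 1)) ' ').toNat : Int) := by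
    rw [pvOrd, ← hL, PySem.List.pyGetD_of_nonneg L ' ' (by omega : (0:Int) ≤ t + size - 1)]
    have h1 : (t + size - 1).toNat = a + (sz - 1) := by omega
    rw [h1]
  have hpw' : (size - 1).toNat = sz - 1 := by omega
  -- unreduced hashes
  set c : Int := ((L.getD (a - 1) ' ').toNat : Int) with hcdef
  set dd : Int := ((L.getD (a + (sz - 1)) ' ').toNat : Int) with hddef
  set um : Int := pvUH ((L.drop a).take (sz - 1)) 0 with humdef
  have hu1 : pvUH (pvW s size (t - 1)) 0 = c * pvBASE ^ (sz - 1) + um := by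
    rw [hW1, pvUH_cons, hmidlen]
  have huT : pvUH (pvW s size t) 0 = um * pvBASE + dd := by
    rw [hW2, pvUH_append]
  -- reduce both sides mod pvMOD
  rw [PySem.Int.mod_eq_emod_of_pos pvMOD_pos, hc, hd, pvH, pvH, pvPH_eq_emod, pvPH_eq_emod,
    hu1, huT, hpw, hpw', PySem.Int.mod_eq_emod_of_pos pvMOD_pos]
  have hcong : ((c * pvBASE ^ (sz - 1) + um) % pvMOD - c * (pvBASE ^ (sz - 1) % pvMOD)) * pvBASE + dd
      ≡ ((c * pvBASE ^ (sz - 1) + um) - c * pvBASE ^ (sz - 1)) * pvBASE + dd [ZMOD pvMOD] := by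
    exact Int.ModEq.add_right dd (Int.ModEq.mul_right pvBASE
      (Int.ModEq.sub (Int.mod_modEq _ pvMOD) (Int.ModEq.mul_left c (Int.mod_modEq _ pvMOD))))
  have hring : ((c * pvBASE ^ (sz - 1) + um) - c * pvBASE ^ (sz - 1)) * pvBASE + dd = um * pvBASE + dd := by
    ring
  rw [hring] at hcong
  exact hcong

-- B's initial fold computes the hash of window 0
theorem pvInit (s : String) (size : Int) (hsz : 1 ≤ size) (hb : size ≤ (s.toList.length : Int)) :
    (PySem.List.pyRange 0 size 1).foldl
      (fun h i => PySem.Int.mod (h * pvBASE + pvOrd s i) pvMOD) 0 = pvH s size 0 := by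
  set L := s.toList with hL
  set sz := size.toNat with hsz'
  have hsa : size = (sz : Int) := by omega
  have hszlen : sz ≤ L.length := by omega
  have main : ∀ m : Nat, m ≤ L.length →
      (List.range m).foldl (fun h (k : Nat) => PySem.Int.mod (h * pvBASE + pvOrd s ((k : Nat) : Int)) pvMOD) 0
        = pvPH (L.take m) := by
    intro m
    induction m with
    | zero => intro _; simp [pvPH]
    | succ m ih =>
      intro hm
      rw [List.range_succ, List.foldl_append, ih (by omega), List.take_succ,
        List.getElem?_eq_getElem (by omega : m < L.length)]
      simp only [Option.toList_some, List.foldl_append, pvPH, List.foldl_cons, List.foldl_nil]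
      have : pvOrd s (m : Int) = ((L[m]'(by omega)).toNat : Int) := by
        rw [pvOrd, ← hL, PySem.List.pyGetD_eq_getElem L ' ' (by omega) (by omega)]
        congr 1
      rw [this]
  have hrange : PySem.List.pyRange 0 size 1 = List.map (fun k : Nat => (k : Int)) (List.range sz) := by
    rw [hsa]; exact PySem.List.pyRange_zero_natCast sz
  rw [hrange, List.foldl_map, main sz hszlen]
  have hW0 : pvW s size 0 = L.take sz := by
    rw [pvW, PySem.List.slice_toNat (xs := s.toList) (a := 0) (b := 0 + size) (by omega) (by omega)]
    congr 1
    omega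
  rw [pvH, hW0]

-- the main simultaneous loop invariant
theorem pvLoop (s : String) (size pw : Int) (hsz : 1 ≤ size)
    (hb : size ≤ (s.toList.length : Int))
    (hpw : pw = PySem.Int.mod (pvBASE ^ (size - 1).toNat) pvMOD) :
    ∀ (k : Nat) (a : Int) (bkts : PySem.Dict Int (List Int)),
      1 ≤ a → k = ((s.toList.length : Int) - size + 1 - a).toNat →
      pvInv s size bkts a →
      searchGoA size s
        (PySem.Set.ofList ((PySem.List.pyRange 0 a 1).map (fun j => pvWS s size j)))
        a ((s.toList.length : Int) - size + 1)
      = searchGoB size s pw (pvH s size (a - 1)) bkts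
        (PySem.List.pyRange a ((s.toList.length : Int) - size + 1) 1) := by
  intro k
  induction k with
  | zero =>
    intro a bkts ha hk _
    rw [PySem.List.pyRange_one_eq_nil (a := a) (b := (s.toList.length : Int) - size + 1) (by omega),
      searchGoA, if_neg (by omega)]
    simp [searchGoB]
  | succ k ih =>
    intro a bkts ha hk hInv
    have ham : a < (s.toList.length : Int) - size + 1 := by omega
    rw [PySem.List.pyRange_one_cons ham, searchGoA, if_pos ham]
    have hfold : ∀ j : Int, PySem.Str.slice s (some j) (some (j + size)) = pvWS s size j :=
      fun j => rfl
    simp only [searchGoB, hfold]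
    rw [pvRoll s size a pw hsz ha (by omega) hpw]
    set P : Prop := ∃ j : Int, (0 ≤ j ∧ j < a) ∧ pvWS s size j = pvWS s size a with hPdef
    set F := (PySem.List.pyRange 0 a 1).filter (fun j => pvH s size j == pvH s size a) with hF
    have hAcond : (PySem.Set.contains
        (PySem.Set.ofList ((PySem.List.pyRange 0 a 1).map (fun j => pvWS s size j)))
        (pvWS s size a) = true) ↔ P := by
      rw [PySem.Set.contains_iff, PySem.Set.mem_ofList, List.mem_map]
      constructor
      · rintro ⟨j, hj, hje⟩
        exact ⟨j, by simpa [PySem.List.mem_pyRange_one] using hj, hje⟩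
      · rintro ⟨j, hj, hje⟩
        exact ⟨j, PySem.List.mem_pyRange_one.mpr ⟨hj.1, hj.2⟩, hje⟩
    have hPF : P ↔ F.any (fun j => pvWS s size j == pvWS s size a) = true := by
      constructor
      · rintro ⟨j, ⟨hj0, hja⟩, hje⟩
        have hWeq : pvW s size j = pvW s size a := (pvWS_eq_iff s size j a).mp hje
        have hHeq : pvH s size j = pvH s size a := by rw [pvH, hWeq]; rfl
        refine List.any_eq_true.mpr ⟨j, ?_, ?_⟩
        · rw [hF]
          exact List.mem_filter.mpr ⟨PySem.List.mem_pyRange_one.mpr ⟨hj0, hja⟩, by simp [hHeq]⟩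
        · simp [hje]
      · intro h
        obtain ⟨j, hjF, hje⟩ := List.any_eq_true.mp h
        have hmem := List.mem_filter.mp hjF
        have := PySem.List.mem_pyRange_one.mp hmem.1
        exact ⟨j, ⟨this.1, this.2⟩, by simpa using hje⟩
    have hVsucc : PySem.Set.add
        (PySem.Set.ofList ((PySem.List.pyRange 0 a 1).map (fun j => pvWS s size j)))
        (pvWS s size a)
        = PySem.Set.ofList ((PySem.List.pyRange 0 (a + 1) 1).map (fun j => pvWS s size j)) := by
      rw [PySem.List.pyRange_one_succ_right (by omega : (0:Int) ≤ a)]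
      simp only [List.map_append, List.map_cons, List.map_nil]
      rw [PySem.Set.ofList_append_singleton]
    have hFsucc : ∀ v : Int, (PySem.List.pyRange 0 (a + 1) 1).filter (fun j => pvH s size j == v)
        = ((PySem.List.pyRange 0 a 1).filter (fun j => pvH s size j == v))
          ++ (if pvH s size a == v then [a] else []) := by
      intro v
      rw [PySem.List.pyRange_one_succ_right (by omega : (0:Int) ≤ a), List.filter_append]
      simp [List.filter_singleton]
    have hInvF := hInv (pvH s size a)
    rw [← hF] at hInvF
    have hrew : pvH s size (a + 1 - 1) = pvH s size a := by norm_num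
    by_cases hFe : F.isEmpty
    · -- no bucket yet: no earlier window has this hash, so no earlier window is equal
      have hnP : ¬ P := by
        intro hp
        obtain ⟨j, hjmem, _⟩ := List.any_eq_true.mp (hPF.mp hp)
        rw [List.isEmpty_iff] at hFe
        simp [hFe] at hjmem
      rw [hInvF, if_pos hFe]
      simp only []
      rw [if_neg (by rw [hAcond]; exact hnP), hVsucc]
      have hInv' : pvInv s size (bkts.insert (pvH s size a) [a]) (a + 1) := by
        intro v
        rw [PySem.Dict.get?_insert, hFsucc v]
        by_cases hv : v = pvH s size a
        · rw [if_pos hv, hv, ← hF, List.isEmpty_iff.mp hFe]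
          simp
        · rw [if_neg hv]
          have : (pvH s size a == v) = false := by simp [Ne.symm hv]
          rw [this]
          simpa using hInv v
      have := ih (a + 1) (bkts.insert (pvH s size a) [a]) (by omega) (by clear_value P F; omega) hInv'
      rw [hrew] at this
      exact this
    · rw [hInvF, if_neg hFe]
      simp only []
      by_cases hP : P
      · rw [if_pos (hAcond.mpr hP), if_pos (hPF.mp hP)]
      · have hany : F.any (fun j => pvWS s size j == pvWS s size a) = false := by
          rw [← Bool.not_eq_true]
          intro hc
          exact hP (hPF.mpr hc)
        rw [if_neg (by rw [hAcond]; exact hP), hany, if_neg (by simp), hVsucc]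
        have hInv' : pvInv s size (bkts.insert (pvH s size a) (F ++ [a])) (a + 1) := by
          intro v
          rw [PySem.Dict.get?_insert, hFsucc v]
          by_cases hv : v = pvH s size a
          · rw [if_pos hv, hv, ← hF]
            simp
          · rw [if_neg hv]
            have : (pvH s size a == v) = false := by simp [Ne.symm hv]
            rw [this]
            simpa using hInv v
        have := ih (a + 1) (bkts.insert (pvH s size a) (F ++ [a])) (by omega) (by clear_value P F; omega) hInv'
        rw [hrew] at this
        exact this

-- ===== VERDICT (by name: the statement is the Claim_ definition above) =====
theorem search_spec : Claim_equal_search := by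
  intro size s _ hpre
  have hsz : 1 ≤ size := hpre
  unfold Spec_search search search_alt
  rw [PySem.Str.len_eq]
  by_cases hsn : (s.toList.length : Int) < size
  · -- the string is shorter than the window: A's loop is empty, B's guard fires
    rw [if_pos (Or.inr hsn), searchGoA, if_neg (by omega)]
  · have hb : size ≤ (s.toList.length : Int) := by omega
    rw [if_neg (by omega)]
    -- peel A's first iteration (start = 0): the visited set is empty there
    have h0lt : (0 : Int) < (s.toList.length : Int) - size + 1 := by omega
    have hstep : searchGoA size s PySem.Set.empty 0 ((s.toList.length : Int) - size + 1)
        = searchGoA size s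
            (PySem.Set.ofList ((PySem.List.pyRange 0 1 1).map (fun j => pvWS s size j)))
            1 ((s.toList.length : Int) - size + 1) := by
      rw [searchGoA, if_pos h0lt]
      have hcf : PySem.Set.contains PySem.Set.empty
          (PySem.Str.slice s (some 0) (some (0 + size))) = false := rfl
      rw [if_neg (by rw [hcf]; exact Bool.false_ne_true)]
      have hlist : PySem.Set.add PySem.Set.empty (PySem.Str.slice s (some 0) (some (0 + size)))
          = PySem.Set.ofList ((PySem.List.pyRange 0 1 1).map (fun j => pvWS s size j)) := by
        have hr1 : PySem.List.pyRange 0 1 1 = [0] := by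
          simpa using PySem.List.pyRange_one_singleton (0 : Int)
        rw [hr1]
        rfl
      rw [hlist, show (0 : Int) + 1 = 1 by norm_num]
    rw [hstep]
    -- B's setup
    rw [pvInit s size hsz hb, PySem.Int.powMod_eq]
    have hInv1 : pvInv s size
        (PySem.Dict.insert PySem.Dict.empty (pvH s size 0) [0]) 1 := by
      intro v
      rw [PySem.Dict.get?_insert]
      have hr1 : PySem.List.pyRange 0 1 1 = [0] := by
        have := PySem.List.pyRange_one_singleton (0 : Int)
        norm_num at this
        exact this
      rw [hr1]
      by_cases hv : v = pvH s size 0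
      · rw [if_pos hv, hv]
        simp
      · rw [if_neg hv, PySem.Dict.get?_empty]
        have : (pvH s size 0 == v) = false := by simp [Ne.symm hv]
        simp [List.filter, this]
    have := pvLoop s size (PySem.Int.mod (pvBASE ^ (size - 1).toNat) pvMOD) hsz hb rfl
      ((s.toList.length : Int) - size + 1 - 1).toNat 1
      (PySem.Dict.insert PySem.Dict.empty (pvH s size 0) [0]) (by omega) rfl hInv1
    rw [show (1 : Int) - 1 = 0 from rfl] at this
    exact this
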